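-- pv_equiv track=rewrite | github.com/TheAndi1/RepoAndi01 | day03.2_solution.py | houses_for_plan
-- ===== SOURCE A (Python) =====
-- def houses_for_plan(plan):
--
--     def next_house_coordinates(direction, x, y):
--         if direction == "^": y += 1
--         elif direction == "v": y -= 1
--         elif direction == "<": x -= 1
--         elif direction == ">": x += 1
--         return x, y
--
--     def check_if_house_already_supplied(supplied_houses, next_coordinates):
--         already_supplied = 0
--         for i in supplied_houses:
--             if i == next_coordinates:
--                 already_supplied = 1
--         return already_supplied
--
--     current_coordinate_W = {"x":100, "y":100} #dictionary for current coordinates (always to be updated)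
--     current_coordinate_R = {"x": 100, "y": 100}  # dictionary for current coordinates (always to be updated)
--
--     start = f"{current_coordinate_W['x']}/{current_coordinate_W['y']}"
--     supplied_houses = [start]
--
--     next_deliverer = "W"
--     for direction in plan:
--
--         if next_deliverer == "W":
--             next_coordinates_W = next_house_coordinates(direction, current_coordinate_W["x"], current_coordinate_W["y"])
--             current_coordinate_W.update({'x': next_coordinates_W[0], 'y': next_coordinates_W[1]})
--             house_coordinates = f"{current_coordinate_W['x']}/{current_coordinate_W['y']}"
--             next_deliverer = "R"
--         elif next_deliverer == "R":
--             next_coordinates_R = next_house_coordinates(direction, current_coordinate_R["x"], current_coordinate_R["y"])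
--             current_coordinate_R.update({'x': next_coordinates_R[0], 'y': next_coordinates_R[1]})
--             house_coordinates = f"{current_coordinate_R['x']}/{current_coordinate_R['y']}"
--             next_deliverer = "W"
--
--
--         if check_if_house_already_supplied(supplied_houses, house_coordinates) == 0:
--             supplied_houses.append(house_coordinates)
--
--
--     return supplied_houses
-- ===== SOURCE B (Python) =====
-- def houses_for_plan(plan):
--     # Two independent walks (W takes even-indexed moves, R odd-indexed),
--     # then a zip-merge back into visit order and one-pass set dedup.
--     DELTA = {"^": (0, 1), "v": (0, -1), "<": (-1, 0), ">": (1, 0)}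
--
--     def walk(moves):
--         x, y = 100, 100
--         positions = []
--         for c in moves:
--             dx, dy = DELTA.get(c, (0, 0))
--             x += dx
--             y += dy
--             positions.append((x, y))
--         return positions
--
--     evens = []
--     odds = []
--     i = 0
--     n = len(plan)
--     while i < n:
--         evens.append(plan[i])
--         if i + 1 < n:
--             odds.append(plan[i + 1])
--         i += 2
--
--     w = walk(evens)
--     r = walk(odds)
--
--     merged = []
--     for p, q in zip(w, r):
--         merged += [p, q]
--     merged += w[len(r):]
--
--     seen = set()
--     result = []
--     for x, y in [(100, 100)] + merged:
--         s = f"{x}/{y}"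
--         if s not in seen:
--             seen.add(s)
--             result.append(s)
--     return result
-- ===== Notes on version B (the rewrite author's own statement) =====
-- stated objective: faster
-- what changed: A walks once with a deliverer toggle and re-scans the whole visited list for every step (quadratic membership check); B splits the plan into the two deliverers' move streams, walks each independently, zip-merges the two position sequences back into visit order and deduplicates in one pass with a hash set.
import Mathlib
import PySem

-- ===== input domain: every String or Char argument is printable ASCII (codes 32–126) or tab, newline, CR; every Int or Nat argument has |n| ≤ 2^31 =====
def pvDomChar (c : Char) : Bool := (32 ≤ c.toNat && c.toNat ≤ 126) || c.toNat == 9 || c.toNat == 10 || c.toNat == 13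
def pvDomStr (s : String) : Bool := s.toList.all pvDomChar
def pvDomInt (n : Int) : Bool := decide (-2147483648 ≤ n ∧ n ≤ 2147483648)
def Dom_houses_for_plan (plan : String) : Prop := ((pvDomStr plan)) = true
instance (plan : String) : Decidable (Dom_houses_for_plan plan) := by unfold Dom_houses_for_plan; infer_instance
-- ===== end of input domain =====

-- B replaces A's single toggled walk with a quadratic membership scan per step by two
-- independent walks over the interleaved move streams, a zip-merge, and a one-pass set dedup.

-- shared formatter for f"{x}/{y}"
def pvFmt (p : Int × Int) : String := PySem.Int.toStr p.1 ++ "/" ++ PySem.Int.toStr p.2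

-- ===== PORT A =====
def pvNextHouse (direction : Char) (x y : Int) : Int × Int :=
  if direction = '^' then (x, y + 1)
  else if direction = 'v' then (x, y - 1)
  else if direction = '<' then (x - 1, y)
  else if direction = '>' then (x + 1, y)
  else (x, y)

def pvCheckSupplied (supplied : List String) (next : String) : Int :=
  supplied.foldl (fun flag i => if i = next then 1 else flag) 0

def pvLoopA : List Char → Int × Int → Int × Int → Bool → List String → List String
  | [], _, _, _, supplied => supplied
  | d :: ds, w, r, nextW, supplied =>
    if nextW then
      let w' := pvNextHouse d w.1 w.2
      let h := pvFmt w'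
      let supplied' := if pvCheckSupplied supplied h = 0 then supplied ++ [h] else supplied
      pvLoopA ds w' r false supplied'
    else
      let r' := pvNextHouse d r.1 r.2
      let h := pvFmt r'
      let supplied' := if pvCheckSupplied supplied h = 0 then supplied ++ [h] else supplied
      pvLoopA ds w r' true supplied'

def houses_for_plan (plan : String) : List String :=
  pvLoopA plan.toList (100, 100) (100, 100) true [pvFmt (100, 100)]

-- ===== PORT B =====
def pvDelta : PySem.Dict Char (Int × Int) :=
  PySem.Dict.ofList [('^', ((0 : Int), (1 : Int))), ('v', (0, -1)), ('<', (-1, 0)), ('>', (1, 0))]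

def pvWalk : Int × Int → List Char → List (Int × Int)
  | _, [] => []
  | p, c :: cs =>
    let d := PySem.Dict.getD pvDelta c (0, 0)
    let p' := (p.1 + d.1, p.2 + d.2)
    p' :: pvWalk p' cs

-- the while-loop of Source B consuming the plan two characters at a time
def pvSplit2 : List Char → List Char × List Char
  | [] => ([], [])
  | [c] => ([c], [])
  | c1 :: c2 :: cs => (c1 :: (pvSplit2 cs).1, c2 :: (pvSplit2 cs).2)

def pvDedupB : List (Int × Int) → PySem.Set String → List String → List String
  | [], _, result => result
  | p :: ps, seen, result =>
    let s := pvFmt p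
    if ¬ (PySem.Set.contains seen s = true) then
      pvDedupB ps (PySem.Set.add seen s) (result ++ [s])
    else
      pvDedupB ps seen result

def houses_for_plan_alt (plan : String) : List String :=
  let eo := pvSplit2 plan.toList
  let w := pvWalk (100, 100) eo.1
  let r := pvWalk (100, 100) eo.2
  let merged := (w.zip r).foldl (fun acc p => acc ++ [p.1, p.2]) [] ++ w.drop r.length
  pvDedupB ((100, 100) :: merged) PySem.Set.empty []

-- ===== PRECONDITION & SPEC =====
def Spec_houses_for_plan (plan : String) (out : List String) : Prop := out = houses_for_plan_alt plan
instance (plan : String) (out : List String) : Decidable (Spec_houses_for_plan plan out) := by unfold Spec_houses_for_plan; infer_instance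

-- ===== CLAIM (what is proved, stated in full; the proofs are below) =====
def Claim_equal_houses_for_plan : Prop := ∀ (plan : String), Dom_houses_for_plan plan → Spec_houses_for_plan plan (houses_for_plan plan)

-- ===== LEMMAS AND PROOFS =====

-- the visit sequence of A's toggled walk: first argument of the pair moves next
def pvTog : List Char → Int × Int → Int × Int → List (Int × Int)
  | [], _, _ => []
  | c :: cs, a, b => pvNextHouse c a.1 a.2 :: pvTog cs b (pvNextHouse c a.1 a.2)

-- A's dedup-by-scan, abstracted over the visit sequence
def pvDedupA : List (Int × Int) → List String → List String
  | [], acc => acc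
  | p :: ps, acc => pvDedupA ps (if pvFmt p ∈ acc then acc else acc ++ [pvFmt p])

theorem pvCheck_foldl (c : String) (hs : List String) (a : Int) :
    hs.foldl (fun flag i => if i = c then 1 else flag) a = if c ∈ hs then 1 else a := by
  induction hs generalizing a with
  | nil => simp
  | cons h t ih =>
    simp only [List.foldl_cons, List.mem_cons, ih]
    by_cases hh : h = c <;> by_cases ht : c ∈ t <;> simp [hh, ht]
    exact fun hch => absurd hch.symm hh

theorem pvCheck_eq (hs : List String) (c : String) :
    pvCheckSupplied hs c = if c ∈ hs then 1 else 0 := pvCheck_foldl c hs 0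

theorem pvLoopA_eq (l : List Char) : ∀ (a b : Int × Int) (acc : List String),
    pvLoopA l a b true acc = pvDedupA (pvTog l a b) acc ∧
    pvLoopA l a b false acc = pvDedupA (pvTog l b a) acc := by
  induction l with
  | nil => intro a b acc; simp [pvLoopA, pvTog, pvDedupA]
  | cons c cs ih =>
    intro a b acc
    refine ⟨?_, ?_⟩
    · by_cases hm : pvFmt (pvNextHouse c a.1 a.2) ∈ acc
      · simpa [pvLoopA, pvTog, pvDedupA, pvCheck_eq, hm] using
          (ih (pvNextHouse c a.1 a.2) b acc).2
      · simpa [pvLoopA, pvTog, pvDedupA, pvCheck_eq, hm] using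
          (ih (pvNextHouse c a.1 a.2) b (acc ++ [pvFmt (pvNextHouse c a.1 a.2)])).2
    · by_cases hm : pvFmt (pvNextHouse c b.1 b.2) ∈ acc
      · simpa [pvLoopA, pvTog, pvDedupA, pvCheck_eq, hm] using
          (ih a (pvNextHouse c b.1 b.2) acc).1
      · simpa [pvLoopA, pvTog, pvDedupA, pvCheck_eq, hm] using
          (ih a (pvNextHouse c b.1 b.2) (acc ++ [pvFmt (pvNextHouse c b.1 b.2)])).1

-- B's delta lookup computes A's next_house_coordinates step
theorem pvStep_eq (c : Char) (x y : Int) :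
    (x + (PySem.Dict.getD pvDelta c (0, 0)).1, y + (PySem.Dict.getD pvDelta c (0, 0)).2)
      = pvNextHouse c x y := by
  by_cases h1 : c = '^'
  · subst h1
    rw [show PySem.Dict.getD pvDelta '^' ((0 : Int), (0 : Int)) = (0, 1) from by decide]
    simp [pvNextHouse]
  · by_cases h2 : c = 'v'
    · subst h2
      rw [show PySem.Dict.getD pvDelta 'v' ((0 : Int), (0 : Int)) = (0, -1) from by decide]
      simp [pvNextHouse, h1, sub_eq_add_neg]
    · by_cases h3 : c = '<'
      · subst h3
        rw [show PySem.Dict.getD pvDelta '<' ((0 : Int), (0 : Int)) = (-1, 0) from by decide]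
        simp [pvNextHouse, h1, h2, sub_eq_add_neg]
      · by_cases h4 : c = '>'
        · subst h4
          rw [show PySem.Dict.getD pvDelta '>' ((0 : Int), (0 : Int)) = (1, 0) from by decide]
          simp [pvNextHouse, h1, h2, h3]
        · rw [show PySem.Dict.getD pvDelta c ((0 : Int), (0 : Int)) = (0, 0) from ?_]
          · simp [pvNextHouse, h1, h2, h3, h4]
          · rw [show pvDelta = PySem.Dict.mk [('^', ((0 : Int), (1 : Int))), ('v', (0, -1)),
                ('<', (-1, 0)), ('>', (1, 0))] from by decide]
            simp [PySem.Dict.getD_eq_get?_getD, Ne.symm h1, Ne.symm h2, Ne.symm h3, Ne.symm h4, PySem.Dict.get?]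

-- B's zip-merge expression
def pvMerge (w r : List (Int × Int)) : List (Int × Int) :=
  (w.zip r).foldl (fun acc p => acc ++ [p.1, p.2]) [] ++ w.drop r.length

theorem pvMerge_cons (x y : Int × Int) (xs ys : List (Int × Int)) :
    pvMerge (x :: xs) (y :: ys) = x :: y :: pvMerge xs ys := by
  simp [pvMerge]

theorem pvTog_eq_merge (l : List Char) : ∀ (a b : Int × Int),
    pvTog l a b = pvMerge (pvWalk a (pvSplit2 l).1) (pvWalk b (pvSplit2 l).2) := by
  induction l using pvSplit2.induct with
  | case1 => intro a b; simp [pvTog, pvSplit2, pvWalk, pvMerge]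
  | case2 c => intro a b; simp [pvTog, pvSplit2, pvWalk, pvMerge, pvStep_eq]
  | case3 c1 c2 cs ih =>
    intro a b
    rw [pvSplit2]
    rw [show pvWalk a (c1 :: (pvSplit2 cs).1)
        = pvNextHouse c1 a.1 a.2 :: pvWalk (pvNextHouse c1 a.1 a.2) (pvSplit2 cs).1 from by
      rw [pvWalk, pvStep_eq]]
    rw [show pvWalk b (c2 :: (pvSplit2 cs).2)
        = pvNextHouse c2 b.1 b.2 :: pvWalk (pvNextHouse c2 b.1 b.2) (pvSplit2 cs).2 from by
      rw [pvWalk, pvStep_eq]]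
    rw [pvMerge_cons, pvTog, pvTog, ← ih]

theorem pvDedupB_eq (ps : List (Int × Int)) : ∀ (seen : PySem.Set String) (res : List String),
    (∀ s, PySem.Set.contains seen s = true ↔ s ∈ res) →
    pvDedupB ps seen res = pvDedupA ps res := by
  induction ps with
  | nil => intro seen res _; rfl
  | cons p ps ih =>
    intro seen res hinv
    rw [pvDedupB, pvDedupA]
    by_cases hm : pvFmt p ∈ res
    · have hc : PySem.Set.contains seen (pvFmt p) = true := (hinv _).mpr hm
      rw [if_neg (by simpa using hc), if_pos hm]
      exact ih seen res hinv
    · have hc : ¬ PySem.Set.contains seen (pvFmt p) = true := fun h => hm ((hinv _).mp h)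
      rw [if_pos hc, if_neg hm]
      refine ih _ _ ?_
      intro s
      rw [PySem.Set.contains_iff, PySem.Set.mem_add]
      constructor
      · rintro (h | h)
        · exact List.mem_append_left _ ((hinv s).mp ((PySem.Set.contains_iff _ _).mpr h))
        · exact List.mem_append_right _ (by simp [h])
      · intro h
        rcases List.mem_append.mp h with h | h
        · exact Or.inl ((PySem.Set.contains_iff _ _).mp ((hinv s).mpr h))
        · exact Or.inr (by simpa using h)

-- ===== VERDICT (by name: the statement is the Claim_ definition above) =====
theorem houses_for_plan_spec : Claim_equal_houses_for_plan := by
  intro plan _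
  show houses_for_plan plan = houses_for_plan_alt plan
  rw [houses_for_plan, houses_for_plan_alt]
  rw [(pvLoopA_eq plan.toList (100, 100) (100, 100) [pvFmt (100, 100)]).1, pvTog_eq_merge]
  show _ = pvDedupB ((100, 100) :: pvMerge (pvWalk (100, 100) (pvSplit2 plan.toList).1)
      (pvWalk (100, 100) (pvSplit2 plan.toList).2)) PySem.Set.empty []
  rw [pvDedupB]
  rw [if_pos (by decide)]
  rw [pvDedupB_eq _ _ _ (by
    intro s
    rw [PySem.Set.contains_iff]
    simp [PySem.Set.empty])]
  simp
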